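-- pv_equiv track=rewrite | github.com/jhenriquezs/transitionPatternsCounter | gonzalez_octree8.py | rotation_check_center
-- ===== SOURCE A (Python) =====
-- from collections import deque
--
-- def validation_faces(array):
--     # establece las caras donde el nodo del centro es el ultimo valor de la lista
--     bottom_face = array[9:12]+array[0:1]+array[15:16]
--     left_side = [array[2],array[5],array[8],array[11],array[17]]
--     right_side = [array[1],array[4],array[7],array[10],array[16]]
--     faces = [array[0:4]+array[12:13],array[3:7]+array[13:14],array[6:10]+array[14:15]]
--     faces.append(bottom_face)
--     faces.append(left_side)
--     faces.append(right_side)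
--     for cara in faces:
--         # si el ultimo valor de la lista que representa a la cara es 1 y no estan los 5 nodos activos, retorna falso
--         if (cara[-1] == 1 and cara.count(1)!=5):
--             return False
--     return True
--
-- def turn_down_center(array):
--     # se rotan los arcos del patron conforme a las posiciones indicadas en la memoria.
--     cola = deque(array[:12])
--     cola.rotate(-3)
--     newlist = list(cola)
--     # se rotan los centros del patron, excepto los del lado izquierdo y derecho, dado a que su posicion no cambia.
--     cola_center = deque(array[12:16])
--     cola_center.rotate(-1)
--     # concatenamos las colas y listas para generar nuestro patron rotado.
--     newlist = newlist+list(cola_center)+array[16:]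
--     return newlist
--
-- def turn_right_center(array):
--     # rotacion de centros y arcos segun las posiciones indicadas en la memoria
--     rotation = [array[11],array[2],array[8],array[5],array[3],array[6],array[4],array[1],array[7],array[10],array[0],array[9]]
--     centros = [array[17],array[13],array[16],array[15],array[12],array[14]]
--     return rotation+centros
--
-- def check_cubes(big_arr,arr1):
--     for arr in big_arr:
--         if (arr == arr1):
--             return True
--     return False
--
-- def rotation_check_center(array, dict):
--     # contamos la cantidad de elementos 1 presentes en la lista que representa al potencial patron.
--     counter = array.count(1)
--     if (counter == 0):
--         return dict
--     # se carga la lista de patrones obtenidos para la cantidad de nodos activos.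
--     ocurr_array = dict[counter]
--     # se procede a rotar el potencial patron, para ver si es similar a los patrones entregados por el diccionario.
--     if (ocurr_array):
--         for i in range(4):
--             for j in range(4):
--                 if (check_cubes(ocurr_array, array)):
--                     return dict
--                 array = turn_right_center(array)
--             array = turn_down_center(array)
--         # se rota el patron a la derecha, porque nos falta ver los lados de la izquierda y la derecha del patron,
--         # como lados superiores e inferiores.
--         array = turn_right_center(array)
--         for i in range(2):
--             array = turn_down_center(array)
--             for j in range(4):
--                 if (check_cubes(ocurr_array, array)):
--                     return dict
--                 array = turn_right_center(array)
--             array = turn_down_center(array)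
--     # se realiza validacion de las caras para el potencial patron, ya que puede considerar el nodo central de la cara como
--     # activo, pero para que este sea valido, tienen que estar los 4 nodos de los arcos activos.
--     if (validation_faces(array)):
--         dict[counter].append(array)
--     return dict
-- ===== SOURCE B (Python) =====
-- def validation_faces(array):
--     bottom_face = array[9:12]+array[0:1]+array[15:16]
--     left_side = [array[2],array[5],array[8],array[11],array[17]]
--     right_side = [array[1],array[4],array[7],array[10],array[16]]
--     faces = [array[0:4]+array[12:13],array[3:7]+array[13:14],array[6:10]+array[14:15]]
--     faces.append(bottom_face)
--     faces.append(left_side)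
--     faces.append(right_side)
--     for cara in faces:
--         if (cara[-1] == 1 and cara.count(1)!=5):
--             return False
--     return True
--
--
-- # The 24 orientations A probes are fixed permutations of indices 0..17 (the first probe
-- # is the array itself); _PERMS lists the 23 non-trivial ones in A's probe order and
-- # _FINAL is the net permutation A's full turn sequence leaves the array in.
-- _PERMS = [[11, 2, 8, 5, 3, 6, 4, 1, 7, 10, 0, 9, 17, 13, 16, 15, 12, 14], [9, 8, 7, 6, 5, 4, 3, 2, 1, 0, 11, 10, 14, 13, 12, 15, 17, 16], [10, 7, 1, 4, 6, 3, 5, 8, 2, 11, 9, 0, 16, 13, 17, 15, 14, 12], [3, 4, 5, 6, 7, 8, 9, 10, 11, 0, 1, 2, 13, 14, 15, 12, 16, 17], [2, 5, 11, 8, 6, 9, 7, 4, 10, 1, 3, 0, 17, 14, 16, 12, 13, 15], [0, 11, 10, 9, 8, 7, 6, 5, 4, 3, 2, 1, 15, 14, 13, 12, 17, 16], [1, 10, 4, 7, 9, 6, 8, 11, 5, 2, 0, 3, 16, 14, 17, 12, 15, 13], [6, 7, 8, 9, 10, 11, 0, 1, 2, 3, 4, 5, 14, 15, 12, 13, 16,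 17], [5, 8, 2, 11, 9, 0, 10, 7, 1, 4, 6, 3, 17, 15, 16, 13, 14, 12], [3, 2, 1, 0, 11, 10, 9, 8, 7, 6, 5, 4, 12, 15, 14, 13, 17, 16], [4, 1, 7, 10, 0, 9, 11, 2, 8, 5, 3, 6, 16, 15, 17, 13, 12, 14], [9, 10, 11, 0, 1, 2, 3, 4, 5, 6, 7, 8, 15, 12, 13, 14, 16, 17], [8, 11, 5, 2, 0, 3, 1, 10, 4, 7, 9, 6, 17, 12, 16, 14, 15, 13], [6, 5, 4, 3, 2, 1, 0, 11, 10, 9, 8, 7, 13, 12, 15, 14, 17, 16], [7, 4, 10, 1, 3, 0, 2, 5, 11, 8, 6, 9, 16, 12, 17, 14, 13, 15], [5, 3, 6, 4, 1, 7, 10, 0, 9, 11, 2, 8, 13, 16, 15, 17, 12, 14], [8, 6, 9, 7, 4, 10, 1, 3, 0, 2, 5, 11, 14, 16, 12, 17, 13, 15], [11, 9, 0, 10, 7, 1, 4, 6, 3, 5, 8, 2, 15, 16, 13, 17, 14, 12], [2, 0, 3, 1, 10, 4, 7, 9, 6, 8, 11, 5, 12, 16, 14, 17, 15, 13], [10,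 0, 9, 11, 2, 8, 5, 3, 6, 4, 1, 7, 15, 17, 13, 16, 12, 14], [7, 9, 6, 8, 11, 5, 2, 0, 3, 1, 10, 4, 14, 17, 12, 16, 15, 13], [4, 6, 3, 5, 8, 2, 11, 9, 0, 10, 7, 1, 13, 17, 15, 16, 14, 12], [1, 3, 0, 2, 5, 11, 8, 6, 9, 7, 4, 10, 12, 17, 14, 16, 13, 15]]
-- _FINAL = [11, 2, 8, 5, 3, 6, 4, 1, 7, 10, 0, 9, 17, 13, 16, 15, 12, 14]
--
--
-- def rotation_check_center(array, dict):
--     counter = array.count(1)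
--     if counter == 0:
--         return dict
--     bucket = dict[counter]
--     final = array
--     if bucket:
--         occ = {tuple(x) for x in bucket}
--         if tuple(array) in occ or any(tuple(array[i] for i in p) in occ for p in _PERMS):
--             return dict
--         final = [array[i] for i in _FINAL]
--     if validation_faces(final):
--         dict[counter].append(final)
--     return dict
-- ===== Notes on version B (the rewrite author's own statement) =====
-- stated objective: alternative
-- what changed: B replaces A's nested rotate-and-probe loops (4x4 + 2x4 right/down turns with an inner linear scan per probe) by 24 precomputed index permutations of positions 0..17: it materialises the probed orientations as table lookups, tests them in one pass against a set built once from the bucket, and obtains the final rotated array from a single net permutation.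
import Mathlib
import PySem

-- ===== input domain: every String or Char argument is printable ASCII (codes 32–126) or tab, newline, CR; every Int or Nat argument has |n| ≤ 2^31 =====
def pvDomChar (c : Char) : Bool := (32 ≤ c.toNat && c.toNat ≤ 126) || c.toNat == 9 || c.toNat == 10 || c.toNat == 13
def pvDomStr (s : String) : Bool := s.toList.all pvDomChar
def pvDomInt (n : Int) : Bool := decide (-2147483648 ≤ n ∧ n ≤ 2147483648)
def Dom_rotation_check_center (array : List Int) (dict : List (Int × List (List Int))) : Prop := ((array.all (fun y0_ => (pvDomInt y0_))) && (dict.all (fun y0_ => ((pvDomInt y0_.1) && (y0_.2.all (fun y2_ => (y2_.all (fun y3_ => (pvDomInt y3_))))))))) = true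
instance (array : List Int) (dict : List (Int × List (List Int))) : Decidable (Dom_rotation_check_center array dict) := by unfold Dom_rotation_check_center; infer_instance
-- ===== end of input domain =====

-- B replaces A's nested rotate-and-probe loops by 24 precomputed index permutations and one
-- set-membership pass ('alternative' decomposition; same asymptotic cost). Python A mutates
-- dict in place (dict[counter].append) and returns it; B performs the same mutation, and the
-- equivalence proved here is about the returned value.

-- ===== PORT A =====
def check_cubes (big_arr : List (List Int)) (arr1 : List Int) : Bool :=
  match big_arr with
  | [] => false
  | arr :: rest => if arr == arr1 then true else check_cubes rest arr1

-- deque(l); rotate(-3) = left rotation by 3; exact for the length-12 slices this receives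
-- (Pre_ guarantees array.length ≥ 18 on every path that calls it)
def turn_down_center (array : List Int) : List Int :=
  let cola := PySem.List.slice array none (some (12:Int))
  let newlist := cola.drop 3 ++ cola.take 3
  let cola_center := PySem.List.slice array (some (12:Int)) (some (16:Int))
  let newlist := newlist ++ (cola_center.drop 1 ++ cola_center.take 1) ++ PySem.List.slice array (some (16:Int)) none
  newlist

-- array[i] at the literal indices below; exact: Pre_ guarantees array.length ≥ 18 wherever this runs
def turn_right_center (array : List Int) : List Int :=
  let g := fun (i : Int) => PySem.List.pyGetD array i 0
  let rotation := [g 11, g 2, g 8, g 5, g 3, g 6, g 4, g 1, g 7, g 10, g 0, g 9]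
  let centros := [g 17, g 13, g 16, g 15, g 12, g 14]
  rotation ++ centros

-- the for-loop with early 'return False' is the .all of the negated condition;
-- cara[-1] via pyGetD is exact (every cara is nonempty when array.length ≥ 18)
def validation_faces (array : List Int) : Bool :=
  let g := fun (i : Int) => PySem.List.pyGetD array i 0
  let sl := fun (a b : Int) => PySem.List.slice array (some a) (some b)
  let bottom_face := sl 9 12 ++ sl 0 1 ++ sl 15 16
  let left_side := [g 2, g 5, g 8, g 11, g 17]
  let right_side := [g 1, g 4, g 7, g 10, g 16]
  let faces := [sl 0 4 ++ sl 12 13, sl 3 7 ++ sl 13 14, sl 6 10 ++ sl 14 15,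
                bottom_face, left_side, right_side]
  faces.all (fun cara => !(PySem.List.pyGetD cara (-1) 0 == 1 && !(PySem.List.count cara 1 == 5)))

-- A's inner j-loop: probe 4 right-turns, 'return dict' = none
def probe4 (ocurr_array : List (List Int)) (st : Option (List Int)) : Option (List Int) :=
  (PySem.List.pyRange 0 4 1).foldl (fun st _ =>
    st.bind (fun a => if check_cubes ocurr_array a then none else some (turn_right_center a))) st

-- A's two early-return probe loops ('return dict' = none; some a = current rotated array)
def rcc_search (ocurr_array : List (List Int)) (array : List Int) : Option (List Int) :=
  let st := (PySem.List.pyRange 0 4 1).foldl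
      (fun st _ => (probe4 ocurr_array st).map turn_down_center) (some array)
  let st := st.map turn_right_center
  (PySem.List.pyRange 0 2 1).foldl
      (fun st _ => (probe4 ocurr_array (st.map turn_down_center)).map turn_down_center) st

def rotation_check_center (array : List Int) (dict : List (Int × List (List Int))) : List (Int × List (List Int)) :=
  let counter := PySem.List.count array 1
  if counter = 0 then dict
  else
    -- dict[counter]: the KeyError case (key absent) is excluded by Pre_
    let ocurr_array := (PySem.Dict.get? ⟨dict⟩ counter).getD []
    let st : Option (List Int) :=
      if ocurr_array.isEmpty then some array else rcc_search ocurr_array array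
    match st with
    | none => dict
    | some a =>
      if validation_faces a then (PySem.Dict.modify ⟨dict⟩ counter [] (fun v => v ++ [a])).items
      else dict

-- ===== PORT B =====
-- The 24 orientations A probes are fixed permutations of indices 0..17 (the first probe is the
-- array itself); pvPerms lists the 23 non-trivial ones in A's probe order, pvFinalPerm is the net
-- permutation left by A's full turn sequence (tables precomputed offline, as in Source B).
def pvPerms : List (List Int) := [
  [11, 2, 8, 5, 3, 6, 4, 1, 7, 10, 0, 9, 17, 13, 16, 15, 12, 14],
  [9, 8, 7, 6, 5, 4, 3, 2, 1, 0, 11, 10, 14, 13, 12, 15, 17, 16],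
  [10, 7, 1, 4, 6, 3, 5, 8, 2, 11, 9, 0, 16, 13, 17, 15, 14, 12],
  [3, 4, 5, 6, 7, 8, 9, 10, 11, 0, 1, 2, 13, 14, 15, 12, 16, 17],
  [2, 5, 11, 8, 6, 9, 7, 4, 10, 1, 3, 0, 17, 14, 16, 12, 13, 15],
  [0, 11, 10, 9, 8, 7, 6, 5, 4, 3, 2, 1, 15, 14, 13, 12, 17, 16],
  [1, 10, 4, 7, 9, 6, 8, 11, 5, 2, 0, 3, 16, 14, 17, 12, 15, 13],
  [6, 7, 8, 9, 10, 11, 0, 1, 2, 3, 4, 5, 14, 15, 12, 13, 16, 17],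
  [5, 8, 2, 11, 9, 0, 10, 7, 1, 4, 6, 3, 17, 15, 16, 13, 14, 12],
  [3, 2, 1, 0, 11, 10, 9, 8, 7, 6, 5, 4, 12, 15, 14, 13, 17, 16],
  [4, 1, 7, 10, 0, 9, 11, 2, 8, 5, 3, 6, 16, 15, 17, 13, 12, 14],
  [9, 10, 11, 0, 1, 2, 3, 4, 5, 6, 7, 8, 15, 12, 13, 14, 16, 17],
  [8, 11, 5, 2, 0, 3, 1, 10, 4, 7, 9, 6, 17, 12, 16, 14, 15, 13],
  [6, 5, 4, 3, 2, 1, 0, 11, 10, 9, 8, 7, 13, 12, 15, 14, 17, 16],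
  [7, 4, 10, 1, 3, 0, 2, 5, 11, 8, 6, 9, 16, 12, 17, 14, 13, 15],
  [5, 3, 6, 4, 1, 7, 10, 0, 9, 11, 2, 8, 13, 16, 15, 17, 12, 14],
  [8, 6, 9, 7, 4, 10, 1, 3, 0, 2, 5, 11, 14, 16, 12, 17, 13, 15],
  [11, 9, 0, 10, 7, 1, 4, 6, 3, 5, 8, 2, 15, 16, 13, 17, 14, 12],
  [2, 0, 3, 1, 10, 4, 7, 9, 6, 8, 11, 5, 12, 16, 14, 17, 15, 13],
  [10, 0, 9, 11, 2, 8, 5, 3, 6, 4, 1, 7, 15, 17, 13, 16, 12, 14],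
  [7, 9, 6, 8, 11, 5, 2, 0, 3, 1, 10, 4, 14, 17, 12, 16, 15, 13],
  [4, 6, 3, 5, 8, 2, 11, 9, 0, 10, 7, 1, 13, 17, 15, 16, 14, 12],
  [1, 3, 0, 2, 5, 11, 8, 6, 9, 7, 4, 10, 12, 17, 14, 16, 13, 15]]

def pvFinalPerm : List Int := [11, 2, 8, 5, 3, 6, 4, 1, 7, 10, 0, 9, 17, 13, 16, 15, 12, 14]

-- [array[i] for i in p]; exact: every table index is < 18 ≤ array.length under Pre_
def applyPerm (array : List Int) (p : List Int) : List Int :=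
  p.map (fun i => PySem.List.pyGetD array i 0)

def alt_search (bucket : List (List Int)) (array : List Int) : Option (List Int) :=
  let occ := PySem.Set.ofList bucket
  if PySem.Set.contains occ array
     || pvPerms.any (fun p => PySem.Set.contains occ (applyPerm array p)) then none
  else some (applyPerm array pvFinalPerm)

def rotation_check_center_alt (array : List Int) (dict : List (Int × List (List Int))) : List (Int × List (List Int)) :=
  let counter := PySem.List.count array 1
  if counter = 0 then dict
  else
    let bucket := (PySem.Dict.get? ⟨dict⟩ counter).getD []
    let final? : Option (List Int) :=
      if bucket.isEmpty then some array else alt_search bucket array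
    match final? with
    | none => dict
    | some final =>
      if validation_faces final then (PySem.Dict.modify ⟨dict⟩ counter [] (fun v => v ++ [final])).items
      else dict

-- ===== PRECONDITION & SPEC =====
-- Exactly where Python A returns: any array with no 1s returns at once; otherwise A indexes
-- array[17] (IndexError below length 18) and dict[counter] (KeyError if the key is absent).
def Pre_rotation_check_center (array : List Int) (dict : List (Int × List (List Int))) : Prop :=
  PySem.List.count array 1 = 0 ∨
    (18 ≤ array.length ∧ (PySem.Dict.get? ⟨dict⟩ (PySem.List.count array 1)).isSome = true)
instance (array : List Int) (dict : List (Int × List (List Int))) : Decidable (Pre_rotation_check_center array dict) := by unfold Pre_rotation_check_center; infer_instance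

def pvWitness_rotation_check_center : List Int × (List (Int × List (List Int))) :=
  ([1, 0, 0, 0, 0, 0, 0, 0, 0, 0, 0, 0, 0, 0, 0, 0, 0, 0], [(1, [])])

def Spec_rotation_check_center (array : List Int) (dict : List (Int × List (List Int))) (out : List (Int × List (List Int))) : Prop := out = rotation_check_center_alt array dict
instance (array : List Int) (dict : List (Int × List (List Int))) (out : List (Int × List (List Int))) : Decidable (Spec_rotation_check_center array dict out) := by unfold Spec_rotation_check_center; infer_instance

-- ===== CLAIM (what is proved, stated in full; the proofs are below) =====
def Claim_equal_rotation_check_center : Prop := ∀ (array : List Int) (dict : List (Int × List (List Int))), Dom_rotation_check_center array dict → Pre_rotation_check_center array dict → Spec_rotation_check_center array dict (rotation_check_center array dict)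

-- ===== LEMMAS AND PROOFS =====

-- A's linear probe equals list membership
lemma check_cubes_eq_contains (big : List (List Int)) (x : List Int) :
    check_cubes big x = big.contains x := by
  induction big with
  | nil => rfl
  | cons h t ih =>
    by_cases hx : h = x
    · simp [check_cubes, hx]
    · simp [check_cubes, hx, ih]
      intro h'; exact absurd h'.symm hx

-- the j-loop probes the state and its three right-turns, then leaves the fourth turn
lemma probe4_eq (occ : List (List Int)) (a : List Int) :
    probe4 occ (some a) =
      if check_cubes occ a then none
      else if check_cubes occ (turn_right_center a) then none
      else if check_cubes occ (turn_right_center (turn_right_center a)) then none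
      else if check_cubes occ (turn_right_center (turn_right_center (turn_right_center a))) then none
      else some (turn_right_center (turn_right_center (turn_right_center (turn_right_center a)))) := by
  simp only [probe4, show PySem.List.pyRange 0 4 1 = [0,1,2,3] from by decide,
    List.foldl_cons, List.foldl_nil, Option.bind]
  split_ifs <;> simp_all

lemma probe4_none (occ : List (List Int)) : probe4 occ none = none := by rfl

-- B's set membership equals list membership
lemma contains_ofList_eq (l : List (List Int)) (x : List Int) :
    List.contains (PySem.Set.ofList l) x = l.contains x := by
  by_cases hx : x ∈ l <;>
    simp [PySem.Set.mem_ofList, hx]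

lemma trc18 (x0 x1 x2 x3 x4 x5 x6 x7 x8 x9 x10 x11 x12 x13 x14 x15 x16 x17 : Int) (rest : List Int) :
    turn_right_center (x0::x1::x2::x3::x4::x5::x6::x7::x8::x9::x10::x11::x12::x13::x14::x15::x16::x17::rest) = [x11, x2, x8, x5, x3, x6, x4, x1, x7, x10, x0, x9, x17, x13, x16, x15, x12, x14] := by
  simp only [turn_right_center, PySem.List.pyGetD_ofNat']
  simp [List.getD]

lemma tdc18 (x0 x1 x2 x3 x4 x5 x6 x7 x8 x9 x10 x11 x12 x13 x14 x15 x16 x17 : Int) (rest : List Int) :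
    turn_down_center (x0::x1::x2::x3::x4::x5::x6::x7::x8::x9::x10::x11::x12::x13::x14::x15::x16::x17::rest) = x3::x4::x5::x6::x7::x8::x9::x10::x11::x0::x1::x2::x13::x14::x15::x12::x16::x17::rest := by
  simp only [turn_down_center, PySem.List.slice, List.length_cons]
  norm_num [Nat.min_def]
  split_ifs <;> first | (exfalso; omega) | simp

set_option maxHeartbeats 4000000 in
lemma search_eq (x0 x1 x2 x3 x4 x5 x6 x7 x8 x9 x10 x11 x12 x13 x14 x15 x16 x17 : Int) (rest : List Int) (occ : List (List Int)) :
    rcc_search occ (x0::x1::x2::x3::x4::x5::x6::x7::x8::x9::x10::x11::x12::x13::x14::x15::x16::x17::rest) = alt_search occ (x0::x1::x2::x3::x4::x5::x6::x7::x8::x9::x10::x11::x12::x13::x14::x15::x16::x17::rest) := by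
  have hp4 : PySem.List.pyRange 0 4 1 = [0, 1, 2, 3] := by decide
  have hp2 : PySem.List.pyRange 0 2 1 = [0, 1] := by decide
  simp only [rcc_search, alt_search, hp4, hp2, List.foldl_cons, List.foldl_nil]
  simp [probe4_eq, probe4_none, trc18, tdc18, check_cubes_eq_contains, contains_ofList_eq, applyPerm, pvPerms, pvFinalPerm, List.getD, PySem.List.pyGetD_ofNat', hp4, hp2]
  by_cases h0 : (x0::x1::x2::x3::x4::x5::x6::x7::x8::x9::x10::x11::x12::x13::x14::x15::x16::x17::rest) ∈ occ
  · simp [probe4_eq, probe4_none, trc18, tdc18, check_cubes_eq_contains, contains_ofList_eq, applyPerm, pvPerms, pvFinalPerm, List.getD, PySem.List.pyGetD_ofNat', hp4, hp2, h0]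
  simp [probe4_eq, probe4_none, trc18, tdc18, check_cubes_eq_contains, contains_ofList_eq, applyPerm, pvPerms, pvFinalPerm, List.getD, PySem.List.pyGetD_ofNat', hp4, hp2, h0]
  by_cases h1 : [x11, x2, x8, x5, x3, x6, x4, x1, x7, x10, x0, x9, x17, x13, x16, x15, x12, x14] ∈ occ
  · simp [probe4_eq, probe4_none, trc18, tdc18, check_cubes_eq_contains, contains_ofList_eq, applyPerm, pvPerms, pvFinalPerm, List.getD, PySem.List.pyGetD_ofNat', hp4, hp2, h1]
  simp [probe4_eq, probe4_none, trc18, tdc18, check_cubes_eq_contains, contains_ofList_eq, applyPerm, pvPerms, pvFinalPerm, List.getD, PySem.List.pyGetD_ofNat', hp4, hp2, h1]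
  by_cases h2 : [x9, x8, x7, x6, x5, x4, x3, x2, x1, x0, x11, x10, x14, x13, x12, x15, x17, x16] ∈ occ
  · simp [probe4_eq, probe4_none, trc18, tdc18, check_cubes_eq_contains, contains_ofList_eq, applyPerm, pvPerms, pvFinalPerm, List.getD, PySem.List.pyGetD_ofNat', hp4, hp2, h2]
  simp [probe4_eq, probe4_none, trc18, tdc18, check_cubes_eq_contains, contains_ofList_eq, applyPerm, pvPerms, pvFinalPerm, List.getD, PySem.List.pyGetD_ofNat', hp4, hp2, h2]
  by_cases h3 : [x10, x7, x1, x4, x6, x3, x5, x8, x2, x11, x9, x0, x16, x13, x17, x15, x14, x12] ∈ occ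
  · simp [probe4_eq, probe4_none, trc18, tdc18, check_cubes_eq_contains, contains_ofList_eq, applyPerm, pvPerms, pvFinalPerm, List.getD, PySem.List.pyGetD_ofNat', hp4, hp2, h3]
  simp [probe4_eq, probe4_none, trc18, tdc18, check_cubes_eq_contains, contains_ofList_eq, applyPerm, pvPerms, pvFinalPerm, List.getD, PySem.List.pyGetD_ofNat', hp4, hp2, h3]
  by_cases h4 : [x3, x4, x5, x6, x7, x8, x9, x10, x11, x0, x1, x2, x13, x14, x15, x12, x16, x17] ∈ occ
  · simp [probe4_eq, probe4_none, trc18, tdc18, check_cubes_eq_contains, contains_ofList_eq, applyPerm, pvPerms, pvFinalPerm, List.getD, PySem.List.pyGetD_ofNat', hp4, hp2, h4]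
  simp [probe4_eq, probe4_none, trc18, tdc18, check_cubes_eq_contains, contains_ofList_eq, applyPerm, pvPerms, pvFinalPerm, List.getD, PySem.List.pyGetD_ofNat', hp4, hp2, h4]
  by_cases h5 : [x2, x5, x11, x8, x6, x9, x7, x4, x10, x1, x3, x0, x17, x14, x16, x12, x13, x15] ∈ occ
  · simp [probe4_eq, probe4_none, trc18, tdc18, check_cubes_eq_contains, contains_ofList_eq, applyPerm, pvPerms, pvFinalPerm, List.getD, PySem.List.pyGetD_ofNat', hp4, hp2, h5]
  simp [probe4_eq, probe4_none, trc18, tdc18, check_cubes_eq_contains, contains_ofList_eq, applyPerm, pvPerms, pvFinalPerm, List.getD, PySem.List.pyGetD_ofNat', hp4, hp2, h5]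
  by_cases h6 : [x0, x11, x10, x9, x8, x7, x6, x5, x4, x3, x2, x1, x15, x14, x13, x12, x17, x16] ∈ occ
  · simp [probe4_eq, probe4_none, trc18, tdc18, check_cubes_eq_contains, contains_ofList_eq, applyPerm, pvPerms, pvFinalPerm, List.getD, PySem.List.pyGetD_ofNat', hp4, hp2, h6]
  simp [probe4_eq, probe4_none, trc18, tdc18, check_cubes_eq_contains, contains_ofList_eq, applyPerm, pvPerms, pvFinalPerm, List.getD, PySem.List.pyGetD_ofNat', hp4, hp2, h6]
  by_cases h7 : [x1, x10, x4, x7, x9, x6, x8, x11, x5, x2, x0, x3, x16, x14, x17, x12, x15, x13] ∈ occ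
  · simp [probe4_eq, probe4_none, trc18, tdc18, check_cubes_eq_contains, contains_ofList_eq, applyPerm, pvPerms, pvFinalPerm, List.getD, PySem.List.pyGetD_ofNat', hp4, hp2, h7]
  simp [probe4_eq, probe4_none, trc18, tdc18, check_cubes_eq_contains, contains_ofList_eq, applyPerm, pvPerms, pvFinalPerm, List.getD, PySem.List.pyGetD_ofNat', hp4, hp2, h7]
  by_cases h8 : [x6, x7, x8, x9, x10, x11, x0, x1, x2, x3, x4, x5, x14, x15, x12, x13, x16, x17] ∈ occ
  · simp [probe4_eq, probe4_none, trc18, tdc18, check_cubes_eq_contains, contains_ofList_eq, applyPerm, pvPerms, pvFinalPerm, List.getD, PySem.List.pyGetD_ofNat', hp4, hp2, h8]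
  simp [probe4_eq, probe4_none, trc18, tdc18, check_cubes_eq_contains, contains_ofList_eq, applyPerm, pvPerms, pvFinalPerm, List.getD, PySem.List.pyGetD_ofNat', hp4, hp2, h8]
  by_cases h9 : [x5, x8, x2, x11, x9, x0, x10, x7, x1, x4, x6, x3, x17, x15, x16, x13, x14, x12] ∈ occ
  · simp [probe4_eq, probe4_none, trc18, tdc18, check_cubes_eq_contains, contains_ofList_eq, applyPerm, pvPerms, pvFinalPerm, List.getD, PySem.List.pyGetD_ofNat', hp4, hp2, h9]
  simp [probe4_eq, probe4_none, trc18, tdc18, check_cubes_eq_contains, contains_ofList_eq, applyPerm, pvPerms, pvFinalPerm, List.getD, PySem.List.pyGetD_ofNat', hp4, hp2, h9]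
  by_cases h10 : [x3, x2, x1, x0, x11, x10, x9, x8, x7, x6, x5, x4, x12, x15, x14, x13, x17, x16] ∈ occ
  · simp [probe4_eq, probe4_none, trc18, tdc18, check_cubes_eq_contains, contains_ofList_eq, applyPerm, pvPerms, pvFinalPerm, List.getD, PySem.List.pyGetD_ofNat', hp4, hp2, h10]
  simp [probe4_eq, probe4_none, trc18, tdc18, check_cubes_eq_contains, contains_ofList_eq, applyPerm, pvPerms, pvFinalPerm, List.getD, PySem.List.pyGetD_ofNat', hp4, hp2, h10]
  by_cases h11 : [x4, x1, x7, x10, x0, x9, x11, x2, x8, x5, x3, x6, x16, x15, x17, x13, x12, x14] ∈ occ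
  · simp [probe4_eq, probe4_none, trc18, tdc18, check_cubes_eq_contains, contains_ofList_eq, applyPerm, pvPerms, pvFinalPerm, List.getD, PySem.List.pyGetD_ofNat', hp4, hp2, h11]
  simp [probe4_eq, probe4_none, trc18, tdc18, check_cubes_eq_contains, contains_ofList_eq, applyPerm, pvPerms, pvFinalPerm, List.getD, PySem.List.pyGetD_ofNat', hp4, hp2, h11]
  by_cases h12 : [x9, x10, x11, x0, x1, x2, x3, x4, x5, x6, x7, x8, x15, x12, x13, x14, x16, x17] ∈ occ
  · simp [probe4_eq, probe4_none, trc18, tdc18, check_cubes_eq_contains, contains_ofList_eq, applyPerm, pvPerms, pvFinalPerm, List.getD, PySem.List.pyGetD_ofNat', hp4, hp2, h12]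
  simp [probe4_eq, probe4_none, trc18, tdc18, check_cubes_eq_contains, contains_ofList_eq, applyPerm, pvPerms, pvFinalPerm, List.getD, PySem.List.pyGetD_ofNat', hp4, hp2, h12]
  by_cases h13 : [x8, x11, x5, x2, x0, x3, x1, x10, x4, x7, x9, x6, x17, x12, x16, x14, x15, x13] ∈ occ
  · simp [probe4_eq, probe4_none, trc18, tdc18, check_cubes_eq_contains, contains_ofList_eq, applyPerm, pvPerms, pvFinalPerm, List.getD, PySem.List.pyGetD_ofNat', hp4, hp2, h13]
  simp [probe4_eq, probe4_none, trc18, tdc18, check_cubes_eq_contains, contains_ofList_eq, applyPerm, pvPerms, pvFinalPerm, List.getD, PySem.List.pyGetD_ofNat', hp4, hp2, h13]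
  by_cases h14 : [x6, x5, x4, x3, x2, x1, x0, x11, x10, x9, x8, x7, x13, x12, x15, x14, x17, x16] ∈ occ
  · simp [probe4_eq, probe4_none, trc18, tdc18, check_cubes_eq_contains, contains_ofList_eq, applyPerm, pvPerms, pvFinalPerm, List.getD, PySem.List.pyGetD_ofNat', hp4, hp2, h14]
  simp [probe4_eq, probe4_none, trc18, tdc18, check_cubes_eq_contains, contains_ofList_eq, applyPerm, pvPerms, pvFinalPerm, List.getD, PySem.List.pyGetD_ofNat', hp4, hp2, h14]
  by_cases h15 : [x7, x4, x10, x1, x3, x0, x2, x5, x11, x8, x6, x9, x16, x12, x17, x14, x13, x15] ∈ occ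
  · simp [probe4_eq, probe4_none, trc18, tdc18, check_cubes_eq_contains, contains_ofList_eq, applyPerm, pvPerms, pvFinalPerm, List.getD, PySem.List.pyGetD_ofNat', hp4, hp2, h15]
  simp [probe4_eq, probe4_none, trc18, tdc18, check_cubes_eq_contains, contains_ofList_eq, applyPerm, pvPerms, pvFinalPerm, List.getD, PySem.List.pyGetD_ofNat', hp4, hp2, h15]
  by_cases h16 : [x5, x3, x6, x4, x1, x7, x10, x0, x9, x11, x2, x8, x13, x16, x15, x17, x12, x14] ∈ occ
  · simp [probe4_eq, probe4_none, trc18, tdc18, check_cubes_eq_contains, contains_ofList_eq, applyPerm, pvPerms, pvFinalPerm, List.getD, PySem.List.pyGetD_ofNat', hp4, hp2, h16]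
  simp [probe4_eq, probe4_none, trc18, tdc18, check_cubes_eq_contains, contains_ofList_eq, applyPerm, pvPerms, pvFinalPerm, List.getD, PySem.List.pyGetD_ofNat', hp4, hp2, h16]
  by_cases h17 : [x8, x6, x9, x7, x4, x10, x1, x3, x0, x2, x5, x11, x14, x16, x12, x17, x13, x15] ∈ occ
  · simp [probe4_eq, probe4_none, trc18, tdc18, check_cubes_eq_contains, contains_ofList_eq, applyPerm, pvPerms, pvFinalPerm, List.getD, PySem.List.pyGetD_ofNat', hp4, hp2, h17]
  simp [probe4_eq, probe4_none, trc18, tdc18, check_cubes_eq_contains, contains_ofList_eq, applyPerm, pvPerms, pvFinalPerm, List.getD, PySem.List.pyGetD_ofNat', hp4, hp2, h17]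
  by_cases h18 : [x11, x9, x0, x10, x7, x1, x4, x6, x3, x5, x8, x2, x15, x16, x13, x17, x14, x12] ∈ occ
  · simp [probe4_eq, probe4_none, trc18, tdc18, check_cubes_eq_contains, contains_ofList_eq, applyPerm, pvPerms, pvFinalPerm, List.getD, PySem.List.pyGetD_ofNat', hp4, hp2, h18]
  simp [probe4_eq, probe4_none, trc18, tdc18, check_cubes_eq_contains, contains_ofList_eq, applyPerm, pvPerms, pvFinalPerm, List.getD, PySem.List.pyGetD_ofNat', hp4, hp2, h18]
  by_cases h19 : [x2, x0, x3, x1, x10, x4, x7, x9, x6, x8, x11, x5, x12, x16, x14, x17, x15, x13] ∈ occ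
  · simp [probe4_eq, probe4_none, trc18, tdc18, check_cubes_eq_contains, contains_ofList_eq, applyPerm, pvPerms, pvFinalPerm, List.getD, PySem.List.pyGetD_ofNat', hp4, hp2, h19]
  simp [probe4_eq, probe4_none, trc18, tdc18, check_cubes_eq_contains, contains_ofList_eq, applyPerm, pvPerms, pvFinalPerm, List.getD, PySem.List.pyGetD_ofNat', hp4, hp2, h19]
  by_cases h20 : [x10, x0, x9, x11, x2, x8, x5, x3, x6, x4, x1, x7, x15, x17, x13, x16, x12, x14] ∈ occ
  · simp [probe4_eq, probe4_none, trc18, tdc18, check_cubes_eq_contains, contains_ofList_eq, applyPerm, pvPerms, pvFinalPerm, List.getD, PySem.List.pyGetD_ofNat', hp4, hp2, h20]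
  simp [probe4_eq, probe4_none, trc18, tdc18, check_cubes_eq_contains, contains_ofList_eq, applyPerm, pvPerms, pvFinalPerm, List.getD, PySem.List.pyGetD_ofNat', hp4, hp2, h20]
  by_cases h21 : [x7, x9, x6, x8, x11, x5, x2, x0, x3, x1, x10, x4, x14, x17, x12, x16, x15, x13] ∈ occ
  · simp [probe4_eq, probe4_none, trc18, tdc18, check_cubes_eq_contains, contains_ofList_eq, applyPerm, pvPerms, pvFinalPerm, List.getD, PySem.List.pyGetD_ofNat', hp4, hp2, h21]
  simp [probe4_eq, probe4_none, trc18, tdc18, check_cubes_eq_contains, contains_ofList_eq, applyPerm, pvPerms, pvFinalPerm, List.getD, PySem.List.pyGetD_ofNat', hp4, hp2, h21]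
  by_cases h22 : [x4, x6, x3, x5, x8, x2, x11, x9, x0, x10, x7, x1, x13, x17, x15, x16, x14, x12] ∈ occ
  · simp [probe4_eq, probe4_none, trc18, tdc18, check_cubes_eq_contains, contains_ofList_eq, applyPerm, pvPerms, pvFinalPerm, List.getD, PySem.List.pyGetD_ofNat', hp4, hp2, h22]
  simp [probe4_eq, probe4_none, trc18, tdc18, check_cubes_eq_contains, contains_ofList_eq, applyPerm, pvPerms, pvFinalPerm, List.getD, PySem.List.pyGetD_ofNat', hp4, hp2, h22]
  by_cases h23 : [x1, x3, x0, x2, x5, x11, x8, x6, x9, x7, x4, x10, x12, x17, x14, x16, x13, x15] ∈ occ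
  · simp [probe4_eq, probe4_none, trc18, tdc18, check_cubes_eq_contains, contains_ofList_eq, applyPerm, pvPerms, pvFinalPerm, List.getD, PySem.List.pyGetD_ofNat', hp4, hp2, h23]
  simp [probe4_eq, probe4_none, trc18, tdc18, check_cubes_eq_contains, contains_ofList_eq, applyPerm, pvPerms, pvFinalPerm, List.getD, PySem.List.pyGetD_ofNat', hp4, hp2, h23]
  exact ⟨h0, h1, h2, h3, h4, h5, h6, h7, h8, h9, h10, h11, h12, h13, h14, h15, h16, h17, h18, h19, h20, h21, h22⟩

-- ===== VERDICT (by name: the statement is the Claim_ definition above) =====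
theorem rotation_check_center_spec : Claim_equal_rotation_check_center := by
  intro array dict _hdom hpre
  unfold Spec_rotation_check_center
  by_cases hc : PySem.List.count array 1 = 0
  · unfold rotation_check_center rotation_check_center_alt
    rw [if_pos hc, if_pos hc]
  · rcases hpre with h0 | ⟨hlen, _hsome⟩
    · exact absurd h0 hc
    rcases array with _|⟨x0,_|⟨x1,_|⟨x2,_|⟨x3,_|⟨x4,_|⟨x5,_|⟨x6,_|⟨x7,_|⟨x8,_|⟨x9,_|⟨x10,_|⟨x11,_|⟨x12,_|⟨x13,_|⟨x14,_|⟨x15,_|⟨x16,_|⟨x17,rest⟩⟩⟩⟩⟩⟩⟩⟩⟩⟩⟩⟩⟩⟩⟩⟩⟩⟩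
    all_goals try (exfalso; simp at hlen; done)
    unfold rotation_check_center rotation_check_center_alt
    simp only [search_eq]
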